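-- pv_equiv track=rewrite | github.com/FrederikBRoth/Semester-4---AI | Lektion06/MinimaxNimAlphaBetaPruning.py | successors_of
-- ===== SOURCE A (Python) =====
-- def successors_of(state):
--     """
--     returns a list of tuples (move, state) as shown in the exercise slides
--     :param state: State of the checkerboard. Ex: [0; 1; 2; 3; X; 5; 6; 7; 8]
--     :return:
--     """
--     successors = list()
--     count = 0
--     for index, number in enumerate(state):
--         for partition in sum_to_n(number, 2):
--             move = state.copy()
--             move.pop(index)
--             if partition[0] == partition[1]:
--                 continue
--             move.append(partition[0])
--             move.append(partition[1])
--             move.sort(reverse=True)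
--             successors.append((count, move))
--             count += 1
--     return successors
--
-- def sum_to_n(n, size, limit=None):
--     if size == 1:
--         yield [n]
--         return
--     if limit is None:
--         limit = n
--     start = (n + size - 1) // size
--     stop = min(limit, n - size + 1) + 1
--     for i in range(start, stop):
--         for tail in sum_to_n(n - i, size - 1, i):
--             yield [i] + tail
-- ===== SOURCE B (Python) =====
-- def successors_of(state):
--     """
--     returns a list of tuples (move, state) as shown in the exercise slides
--     :param state: State of the checkerboard. Ex: [0; 1; 2; 3; X; 5; 6; 7; 8]
--     :return:
--     """
--     moves = []
--     for index, number in enumerate(state):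
--         rest = state[:index] + state[index + 1:]
--         for larger in range(number // 2 + 1, number):
--             moves.append(sorted(rest + [larger, number - larger], reverse=True))
--     return list(enumerate(moves))
-- ===== Notes on version B (the rewrite author's own statement) =====
-- stated objective: simpler
-- what changed: Replaces the generic recursive sum_to_n generator, the copy/pop/append/in-place-sort mutation and the hand-kept count with a direct loop over range(number//2+1, number) building each sorted successor from slices, numbering the moves at the end with enumerate.
import Mathlib
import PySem

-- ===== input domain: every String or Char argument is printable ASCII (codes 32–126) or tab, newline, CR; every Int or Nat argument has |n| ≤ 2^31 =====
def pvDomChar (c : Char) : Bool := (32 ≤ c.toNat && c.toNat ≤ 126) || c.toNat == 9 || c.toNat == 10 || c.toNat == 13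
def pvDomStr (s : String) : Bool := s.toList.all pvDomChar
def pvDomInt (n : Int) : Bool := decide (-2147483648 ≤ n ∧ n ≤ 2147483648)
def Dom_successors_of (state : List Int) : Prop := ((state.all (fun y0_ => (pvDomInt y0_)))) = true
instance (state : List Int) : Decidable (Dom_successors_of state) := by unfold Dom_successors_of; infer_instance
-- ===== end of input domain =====

-- B replaces the recursive sum_to_n generator and the copy/pop/append/sort/count bookkeeping by a
-- direct range loop over the larger part with a final enumerate; objective: simpler.

-- ===== PORT A =====
-- sum_to_n(n, size, limit): size is a Nat fuel-like argument matching Python's positive size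
-- (A only calls size = 2, which recurses to size = 1); size = 0 raises ZeroDivisionError in
-- Python and is never reached, ported as [].
def sum_to_n : Int → Nat → Option Int → List (List Int)
  | n, 1, _ => [[n]]
  | n, k + 2, limit =>
      let size : Int := (k : Int) + 2
      let limit' := limit.getD n
      let start := PySem.Int.floordiv (n + size - 1) size
      let stop := min limit' (n - size + 1) + 1
      (PySem.List.pyRange start stop 1).flatMap (fun i =>
        (sum_to_n (n - i) (k + 1) (some i)).map (fun tail => i :: tail))
  | _, 0, _ => []

-- partition[0] / partition[1] are ported with pyGetD (every partition from sum_to_n _ 2 _ has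
-- length 2, so the default is never used); move.pop(index) is pop?, in range for every index
-- that enumerate produces, with the (unreachable) none case leaving the accumulator unchanged.
def successors_of (state : List Int) : List (Int × List Int) :=
  ((PySem.List.enumerate state).foldl
    (fun (acc : List (Int × List Int) × Int) p =>
      (sum_to_n p.2 2 none).foldl
        (fun acc2 partition =>
          match PySem.List.pop? state p.1 with
          | none => acc2
          | some (_, move) =>
            if PySem.List.pyGetD partition 0 0 = PySem.List.pyGetD partition 1 0 then acc2
            else
              (acc2.1 ++ [(acc2.2,
                  PySem.List.sorted
                    (move ++ [PySem.List.pyGetD partition 0 0] ++ [PySem.List.pyGetD partition 1 0])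
                    (fun x => x) true)],
               acc2.2 + 1))
        acc)
    ([], 0)).1

-- ===== PORT B =====
def successors_of_alt (state : List Int) : List (Int × List Int) :=
  PySem.List.enumerate
    ((PySem.List.enumerate state).foldl
      (fun (moves : List (List Int)) p =>
        moves ++ (PySem.List.pyRange (PySem.Int.floordiv p.2 2 + 1) p.2 1).map
          (fun larger =>
            PySem.List.sorted
              ((PySem.List.slice state none (some p.1) ++ PySem.List.slice state (some (p.1 + 1)) none)
                ++ [larger, p.2 - larger]) (fun x => x) true))
      [])

-- ===== PRECONDITION & SPEC =====
def Spec_successors_of (state : List Int) (out : List (Int × List Int)) : Prop := out = successors_of_alt state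
instance (state : List Int) (out : List (Int × List Int)) : Decidable (Spec_successors_of state out) := by unfold Spec_successors_of; infer_instance

-- ===== CLAIM (what is proved, stated in full; the proofs are below) =====
def Claim_equal_successors_of : Prop := ∀ (state : List Int), Dom_successors_of state → Spec_successors_of state (successors_of state)

-- ===== LEMMAS AND PROOFS =====

def restFn (state : List Int) (i : Int) : List Int :=
  PySem.List.slice state none (some i) ++ PySem.List.slice state (some (i + 1)) none

def mvList (state : List Int) (idx n : Int) : List (List Int) :=
  (PySem.List.pyRange (PySem.Int.floordiv n 2 + 1) n 1).map
    (fun i => PySem.List.sorted (restFn state idx ++ [i, n - i]) (fun x => x) true)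

def numFrom {α : Type} (c : Int) : List α → List (Int × α)
  | [] => []
  | x :: xs => (c, x) :: numFrom (c + 1) xs

theorem enumerate_eq_numFrom {α : Type} (xs : List α) (s : Int) :
    PySem.List.enumerate xs s = numFrom s xs := by
  induction xs generalizing s with
  | nil => simp [numFrom]
  | cons x xs ih => simp [PySem.List.enumerate_cons, numFrom, ih]

theorem numFrom_append {α : Type} (c : Int) (xs ys : List α) :
    numFrom c (xs ++ ys) = numFrom c xs ++ numFrom (c + xs.length) ys := by
  induction xs generalizing c with
  | nil => simp [numFrom]
  | cons x xs ih =>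
    simp only [List.cons_append, numFrom, ih, List.length_cons]
    rw [show c + 1 + (xs.length : Int) = c + ((xs.length : Int) + 1) by ring]
    push_cast; ring_nf

theorem flatMap_single {α β : Type} (l : List α) (f : α → β) :
    l.flatMap (fun x => [f x]) = l.map f := by
  induction l with
  | nil => rfl
  | cons x xs ih => simp [ih]

theorem sum_to_n_two (n : Int) :
    sum_to_n n 2 none
      = (PySem.List.pyRange (PySem.Int.floordiv (n + 1) 2) n 1).map (fun i => [i, n - i]) := by
  show (PySem.List.pyRange _ _ 1).flatMap _ = _
  simp only [Option.getD_none, Nat.cast_zero, zero_add]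
  rw [show n + 2 - 1 = n + 1 by ring]
  rw [show min n (n - 2 + 1) + 1 = n by rw [show n - 2 + 1 = n - 1 by ring, min_eq_right (by omega)]; ring]
  rw [← flatMap_single]
  rfl

theorem A_inner (rest : List Int) (n : Int) (l : List Int) (h : ∀ i ∈ l, 2 * i ≠ n)
    (acc : List (Int × List Int)) (c : Int) :
    (l.map (fun i => ([i, n - i] : List Int))).foldl
      (fun acc2 partition =>
        if PySem.List.pyGetD partition 0 0 = PySem.List.pyGetD partition 1 0 then acc2
        else
          (acc2.1 ++ [(acc2.2,
              PySem.List.sorted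
                (rest ++ [PySem.List.pyGetD partition 0 0] ++ [PySem.List.pyGetD partition 1 0])
                (fun x => x) true)],
           acc2.2 + 1))
      (acc, c)
    = (acc ++ numFrom c (l.map (fun i => PySem.List.sorted (rest ++ [i, n - i]) (fun x => x) true)),
       c + l.length) := by
  induction l generalizing acc c with
  | nil => simp [numFrom]
  | cons i l ih =>
    have hne : i ≠ n - i := by have := h i (List.mem_cons_self ..); omega
    simp only [List.map_cons, List.foldl_cons]
    rw [show PySem.List.pyGetD ([i, n - i] : List Int) 0 0 = i from rfl,
        show PySem.List.pyGetD ([i, n - i] : List Int) 1 0 = n - i from rfl]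
    rw [if_neg hne]
    rw [ih (fun j hj => h j (List.mem_cons_of_mem _ hj))]
    simp only [Prod.mk.injEq, numFrom, List.length_cons]
    refine ⟨by simp [List.append_assoc], by push_cast; ring⟩

theorem A_inner_full (state : List Int) (idx e : Int)
    (hpop : PySem.List.pop? state idx = some (e, restFn state idx))
    (n : Int) (acc : List (Int × List Int)) (c : Int) :
    (sum_to_n n 2 none).foldl
      (fun acc2 partition =>
        match PySem.List.pop? state idx with
        | none => acc2
        | some (_, move) =>
          if PySem.List.pyGetD partition 0 0 = PySem.List.pyGetD partition 1 0 then acc2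
          else
            (acc2.1 ++ [(acc2.2,
                PySem.List.sorted
                  (move ++ [PySem.List.pyGetD partition 0 0] ++ [PySem.List.pyGetD partition 1 0])
                  (fun x => x) true)],
             acc2.2 + 1))
      (acc, c)
    = (acc ++ numFrom c (mvList state idx n), c + (mvList state idx n).length) := by
  rw [sum_to_n_two, mvList]
  simp only [hpop]
  have h2 : (0 : Int) < 2 := by norm_num
  simp only [PySem.Int.floordiv_eq_ediv_of_pos h2]
  rcases lt_trichotomy n 1 with hn | hn | hn
  · rw [PySem.List.pyRange_one_eq_nil (by omega), PySem.List.pyRange_one_eq_nil (by omega)]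
    simp [numFrom]
  · subst hn
    rw [PySem.List.pyRange_one_eq_nil (by norm_num), PySem.List.pyRange_one_eq_nil (by norm_num)]
    simp [numFrom]
  · by_cases hpar : n % 2 = 0
    · -- even, n ≥ 2: A range starts at n/2, whose equal split is skipped by continue
      have hlt : (n + 1) / 2 < n := by omega
      rw [PySem.List.pyRange_one_cons hlt]
      have hsk : (n + 1) / 2 = n - (n + 1) / 2 := by omega
      simp only [List.map_cons, List.foldl_cons]
      rw [show PySem.List.pyGetD ([(n + 1) / 2, n - (n + 1) / 2] : List Int) 0 0 = (n + 1) / 2 from rfl,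
          show PySem.List.pyGetD ([(n + 1) / 2, n - (n + 1) / 2] : List Int) 1 0 = n - (n + 1) / 2 from rfl]
      rw [if_pos hsk]
      rw [show (n + 1) / 2 + 1 = n / 2 + 1 by omega, List.length_map]
      exact A_inner (restFn state idx) n (PySem.List.pyRange (n / 2 + 1) n 1)
        (fun i hi => by rw [PySem.List.mem_pyRange_one] at hi; omega) acc c
    · -- odd: the two ranges coincide
      rw [show (n + 1) / 2 = n / 2 + 1 by omega, List.length_map]
      exact A_inner (restFn state idx) n (PySem.List.pyRange (n / 2 + 1) n 1)
        (fun i hi => by rw [PySem.List.mem_pyRange_one] at hi; omega) acc c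

theorem pop_enum (state : List Int) (p : Int × Int) (hp : p ∈ PySem.List.enumerate state) :
    ∃ e, PySem.List.pop? state p.1 = some (e, restFn state p.1) := by
  rw [PySem.List.mem_enumerate_iff] at hp
  obtain ⟨k, hk, rfl⟩ := hp
  refine ⟨state[k], ?_⟩
  have h0 : ((0 : Int) + (k : Int)) = (k : Int) := by ring
  simp only [h0]
  rw [PySem.List.pop?_natCast state k hk]
  rw [restFn, PySem.List.slice_to_natCast,
    show ((k : Int) + 1) = (((k + 1 : Nat)) : Int) by push_cast; ring,
    PySem.List.slice_from_natCast]
  rw [List.eraseIdx_eq_take_drop_succ]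

theorem A_outer (state : List Int) (l : List (Int × Int))
    (h : ∀ p ∈ l, ∃ e, PySem.List.pop? state p.1 = some (e, restFn state p.1))
    (acc : List (Int × List Int)) (c : Int) :
    l.foldl
      (fun (acc : List (Int × List Int) × Int) p =>
        (sum_to_n p.2 2 none).foldl
          (fun acc2 partition =>
            match PySem.List.pop? state p.1 with
            | none => acc2
            | some (_, move) =>
              if PySem.List.pyGetD partition 0 0 = PySem.List.pyGetD partition 1 0 then acc2
              else
                (acc2.1 ++ [(acc2.2,
                    PySem.List.sorted
                      (move ++ [PySem.List.pyGetD partition 0 0] ++ [PySem.List.pyGetD partition 1 0])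
                      (fun x => x) true)],
                 acc2.2 + 1))
          acc)
      (acc, c)
    = (acc ++ numFrom c (l.flatMap (fun p => mvList state p.1 p.2)),
       c + (l.flatMap (fun p => mvList state p.1 p.2)).length) := by
  induction l generalizing acc c with
  | nil => simp [numFrom]
  | cons p l ih =>
    obtain ⟨e, hpop⟩ := h p (List.mem_cons_self ..)
    simp only [List.foldl_cons]
    rw [A_inner_full state p.1 e hpop]
    rw [ih (fun q hq => h q (List.mem_cons_of_mem _ hq))]
    simp only [List.flatMap_cons, Prod.mk.injEq]
    rw [numFrom_append]
    refine ⟨by simp [List.append_assoc], by rw [List.length_append]; push_cast; ring⟩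

theorem B_char (state : List Int) :
    successors_of_alt state
      = numFrom 0 ((PySem.List.enumerate state).flatMap (fun p => mvList state p.1 p.2)) := by
  unfold successors_of_alt
  rw [PySem.List.foldl_append_eq_flatMap]
  rw [enumerate_eq_numFrom]
  rfl

-- ===== VERDICT (by name: the statement is the Claim_ definition above) =====
theorem successors_of_spec : Claim_equal_successors_of := by
  intro state _
  show successors_of state = successors_of_alt state
  unfold successors_of
  rw [A_outer state _ (fun p hp => pop_enum state p hp)]
  rw [B_char]
  simp
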